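-- pv_equiv track=rewrite | github.com/RealTimeWeb/datasets | builder/compile.py | de_identifier
-- ===== SOURCE A (Python) =====
-- def de_identifier(name):
--     name = name.replace("_", " ").replace("-", " ")
--     result = []
--     for word in name.split(" "):
--         if word and word[0].upper() == word[0]:
--             word = word[0].lower() + word[1:]
--         result.append(word)
--     return " ".join(result)
-- ===== SOURCE B (Python) =====
-- def de_identifier(name):
--     # One left-to-right pass: separators become spaces; the first character
--     # after a boundary is lowercased.
--     out = []
--     boundary = True
--     for c in name:
--         if c in "_- ":
--             out.append(" ")
--             boundary = True
--         elif boundary: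
--             out.append(c.lower())
--             boundary = False
--         else:
--             out.append(c)
--     return "".join(out)
-- ===== Notes on version B (the rewrite author's own statement) =====
-- stated objective: alternative
-- what changed: Replaces A's replace+replace+split+join multi-pass pipeline by a single left-to-right scan with a boundary flag that emits each output character directly.
import Mathlib
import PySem

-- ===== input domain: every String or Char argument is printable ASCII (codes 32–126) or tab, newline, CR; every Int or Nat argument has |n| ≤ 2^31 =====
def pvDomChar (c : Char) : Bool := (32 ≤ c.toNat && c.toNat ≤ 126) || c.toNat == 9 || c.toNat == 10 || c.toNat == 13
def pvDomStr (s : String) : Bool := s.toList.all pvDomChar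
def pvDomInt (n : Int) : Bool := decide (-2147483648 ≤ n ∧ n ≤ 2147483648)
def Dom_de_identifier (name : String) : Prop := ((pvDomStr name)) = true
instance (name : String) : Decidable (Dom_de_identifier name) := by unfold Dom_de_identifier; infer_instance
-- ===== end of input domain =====

-- B replaces A's replace+split+join pipeline by a single scan with a boundary flag (alternative decomposition, same result).


-- ===== PORT A =====
-- 'if word and word[0].upper() == word[0]: word = word[0].lower() + word[1:]'
def aFix (word : List Char) : List Char :=
  match word with
  | [] => word
  | c :: rest => if PySem.Chars.upperChar c == c then PySem.Chars.lowerChar c :: rest else word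

def de_identifier (name : String) : String :=
  let n := PySem.Chars.replace (PySem.Chars.replace name.toList ['_'] [' ']) ['-'] [' ']
  let result := (PySem.Chars.splitOn n [' ']).foldl (fun res w => res ++ [aFix w]) ([] : List (List Char))
  String.ofList (PySem.Chars.join [' '] result)

-- ===== PORT B =====
def altGo : Bool → List Char → List Char
  | _, [] => []
  | b, c :: cs =>
    if c = '_' ∨ c = '-' ∨ c = ' ' then ' ' :: altGo true cs
    else (if b then PySem.Chars.lowerChar c else c) :: altGo false cs

def de_identifier_alt (name : String) : String := String.ofList (altGo true name.toList)

-- ===== PRECONDITION & SPEC =====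
def Spec_de_identifier (name : String) (out : String) : Prop := out = de_identifier_alt name
instance (name : String) (out : String) : Decidable (Spec_de_identifier name out) := by unfold Spec_de_identifier; infer_instance

-- ===== CLAIM (what is proved, stated in full; the proofs are below) =====
def Claim_equal_de_identifier : Prop := ∀ (name : String), Dom_de_identifier name → Spec_de_identifier name (de_identifier name)

-- ===== LEMMAS AND PROOFS =====

-- combined effect of the two single-character replaces
def subChar (c : Char) : Char := if c = '_' ∨ c = '-' then ' ' else c

-- lowercase the first character unconditionally
def fixW : List Char → List Char
  | [] => []
  | c :: r => PySem.Chars.lowerChar c :: r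

-- first word of a split on ' '
def scan1 : List Char → List Char
  | [] => []
  | c :: t => if c = ' ' then [] else c :: scan1 t

-- remaining words of a split on ' '
def scanR : List Char → List (List Char)
  | [] => []
  | c :: t => if c = ' ' then scan1 t :: scanR t else scanR t

theorem lowerChar_of_upper_ne (c : Char) (h : PySem.Chars.upperChar c ≠ c) :
    PySem.Chars.lowerChar c = c := by
  unfold PySem.Chars.upperChar at h
  split_ifs at h with hl
  · unfold PySem.Chars.lowerChar
    rw [if_neg]
    intro hu
    unfold PySem.Chars.islower at hl
    unfold PySem.Chars.isupper at hu
    simp only [Bool.and_eq_true, decide_eq_true_eq] at hl hu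
    have a1 : 97 ≤ c.toNat := Fin.mk_le_mk.mp hl.1
    have a4 : c.toNat ≤ 90 := Fin.mk_le_mk.mp hu.2
    omega
  · exact absurd rfl h

theorem aFix_eq_fixW (w : List Char) : aFix w = fixW w := by
  cases w with
  | nil => rfl
  | cons c r =>
    unfold aFix fixW
    by_cases h : PySem.Chars.upperChar c = c
    · simp [h]
    · simp [h, lowerChar_of_upper_ne c h]

theorem replace_go_single (o n : Char) : ∀ (l : List Char) (fuel : Nat) (acc : List Char),
    l.length ≤ fuel →
    PySem.Chars.replace.go [o] [n] fuel l acc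
      = acc.reverse ++ l.map (fun c => if c = o then n else c) := by
  intro l
  induction l with
  | nil =>
    intro fuel acc _
    cases fuel <;> simp [PySem.Chars.replace.go]
  | cons c t ih =>
    intro fuel acc h
    cases fuel with
    | zero => simp at h
    | succ f =>
      rw [PySem.Chars.replace.go]
      by_cases hc : c = o
      · simp only [List.isPrefixOf, hc, BEq.rfl, Bool.true_and,
          if_true, List.length_singleton, List.drop_succ_cons, List.drop_zero,
          List.reverse_singleton, List.singleton_append]
        rw [ih f (n :: acc) (by simpa using h)]
        simp
      · have : ([o].isPrefixOf (c :: t)) = false := by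
          simp [List.isPrefixOf]
          exact fun hh => absurd hh.symm hc
        simp only [this, Bool.false_eq_true, if_false]
        rw [ih f (c :: acc) (by simpa using h)]
        simp [hc]

theorem replace_single (o n : Char) (l : List Char) :
    PySem.Chars.replace l [o] [n] = l.map (fun c => if c = o then n else c) := by
  unfold PySem.Chars.replace
  rw [if_neg (by simp)]
  simpa using replace_go_single o n l l.length [] le_rfl

theorem splitOn_go_eq : ∀ (l : List Char) (fuel : Nat) (cur : List Char) (acc : List (List Char)),
    l.length < fuel →
    PySem.Chars.splitOn.go [' '] fuel l cur acc
      = acc.reverse ++ ((cur.reverse ++ scan1 l) :: scanR l) := by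
  intro l
  induction l with
  | nil =>
    intro fuel cur acc h
    cases fuel with
    | zero => omega
    | succ f => simp [PySem.Chars.splitOn.go, scan1, scanR]
  | cons c t ih =>
    intro fuel cur acc h
    cases fuel with
    | zero => omega
    | succ f =>
      rw [PySem.Chars.splitOn.go]
      by_cases hc : c = ' '
      · have hp : ([' '].isPrefixOf (c :: t)) = true := by simp [List.isPrefixOf, hc]
        simp only [hp, if_true, List.length_singleton, List.drop_succ_cons, List.drop_zero]
        rw [ih f [] (cur.reverse :: acc) (by simp at h ⊢; omega)]
        simp [scan1, scanR, hc]
      · have hp : ([' '].isPrefixOf (c :: t)) = false := by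
          simp [List.isPrefixOf]
          exact fun hh => absurd hh.symm hc
        simp only [hp, Bool.false_eq_true, if_false]
        rw [ih f (c :: cur) acc (by simp at h ⊢; omega)]
        simp [scan1, scanR, hc]

theorem splitOn_eq (l : List Char) :
    PySem.Chars.splitOn l [' '] = scan1 l :: scanR l := by
  unfold PySem.Chars.splitOn
  rw [splitOn_go_eq l (l.length + 1) [] [] (by omega)]
  simp

theorem foldl_push {α β : Type} (f : α → β) :
    ∀ (ws : List α) (init : List β),
    ws.foldl (fun r w => r ++ [f w]) init = init ++ ws.map f := by
  intro ws
  induction ws with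
  | nil => simp
  | cons w t ih => intro init; simp [List.foldl_cons, ih]

theorem join_cons (w : List Char) (ws : List (List Char)) :
    PySem.Chars.join [' '] (w :: ws) = w ++ ws.flatMap (fun v => ' ' :: v) := by
  induction ws generalizing w with
  | nil => simp [PySem.Chars.join, List.intercalate]
  | cons v t ih =>
    have h := ih v
    simp only [PySem.Chars.join, List.intercalate] at h ⊢
    rw [List.intersperse_cons₂, List.flatten_cons, List.flatten_cons, h]
    simp

theorem altGo_eq (l : List Char) :
    altGo true l
      = fixW (scan1 (l.map subChar)) ++ (scanR (l.map subChar)).flatMap (fun v => ' ' :: fixW v)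
  ∧ altGo false l
      = scan1 (l.map subChar) ++ (scanR (l.map subChar)).flatMap (fun v => ' ' :: fixW v) := by
  induction l with
  | nil => simp [altGo, scan1, scanR, fixW]
  | cons c t ih =>
    by_cases hc : c = '_' ∨ c = '-' ∨ c = ' '
    · have hsub : subChar c = ' ' := by
        unfold subChar
        rcases hc with h | h | h <;> simp [h]
      constructor <;>
        simp [altGo, hc, hsub, scan1, scanR, fixW, ih.1]
    · have hsub : subChar c = c := by
        unfold subChar
        rw [if_neg]
        intro h
        exact hc (by tauto)
      have hcs : c ≠ ' ' := fun h => hc (Or.inr (Or.inr h))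
      have h1 : c ≠ '_' := fun h => hc (Or.inl h)
      have h2 : c ≠ '-' := fun h => hc (Or.inr (Or.inl h))
      constructor <;>
        simp [altGo, h1, h2, hsub, scan1, scanR, fixW, hcs, ih.2]

theorem sub_comp (c : Char) :
    (fun c => if c = '-' then ' ' else c) ((fun c => if c = '_' then ' ' else c) c) = subChar c := by
  unfold subChar
  by_cases h1 : c = '_' <;> by_cases h2 : c = '-' <;> simp [h1, h2]

-- ===== VERDICT (by name: the statement is the Claim_ definition above) =====
theorem de_identifier_spec : Claim_equal_de_identifier := by
  intro name _
  unfold Spec_de_identifier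
  have hm : ((fun c => if c = '-' then ' ' else c) ∘ fun c => if c = '_' then ' ' else c)
      = subChar := funext fun c => sub_comp c
  simp only [de_identifier, de_identifier_alt, replace_single, List.map_map, hm, splitOn_eq,
    foldl_push, List.nil_append, List.map_cons, join_cons]
  congr 1
  rw [(altGo_eq name.toList).1]
  rw [List.flatMap_map]
  simp [aFix_eq_fixW]
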